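-- pv_equiv track=rewrite | github.com/sfavorite/algorithms | machine_learning/bag_of_words/python/bag_of_words.py | createBigBagOfWords
-- ===== SOURCE A (Python) =====
-- def createBigBagOfWords(corpus):
--     bag = []
--
--     for doc in corpus:
--         # Break the sentence(s) into individual words
--         words = doc.split()
--         # Create a list of all the words NOT in the bag_of_words already
--         not_in_bag = list(set(words) - set(bag))
--         # Add new words to the bag
--         bag = bag + not_in_bag
--
--     bag.sort()
--     return bag
-- ===== SOURCE B (Python) =====
-- def createBigBagOfWords(corpus):
--     # Flatten all documents into one token list, sort it, then
--     # remove duplicates in a single pass by comparing with the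
--     # previously appended word (adjacency dedup; no sets/hashing).
--     all_words = []
--     for doc in corpus:
--         for w in doc.split():
--             all_words.append(w)
--     all_words.sort()
--     result = []
--     for w in all_words:
--         if not result or w != result[-1]:
--             result.append(w)
--     return result
-- ===== Notes on version B (the rewrite author's own statement) =====
-- stated objective: faster
-- what changed: Replaces A's per-document set-difference accumulation (set(words) - set(bag) rebuilt each iteration) followed by a final sort with flatten-all-tokens, sort once, and a single adjacency-based dedup pass with no sets or hashing.
import Mathlib
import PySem

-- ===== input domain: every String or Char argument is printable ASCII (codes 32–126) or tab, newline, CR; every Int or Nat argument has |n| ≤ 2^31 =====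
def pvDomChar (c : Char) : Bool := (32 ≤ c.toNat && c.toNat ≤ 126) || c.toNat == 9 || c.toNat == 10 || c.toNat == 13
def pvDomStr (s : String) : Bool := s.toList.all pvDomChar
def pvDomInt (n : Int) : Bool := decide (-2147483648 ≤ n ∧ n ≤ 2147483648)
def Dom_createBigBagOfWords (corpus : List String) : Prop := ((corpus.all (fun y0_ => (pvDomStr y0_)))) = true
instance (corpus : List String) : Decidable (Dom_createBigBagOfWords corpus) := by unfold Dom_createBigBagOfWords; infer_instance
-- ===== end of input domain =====

-- B flattens every document's tokens into one list, sorts it once, and removes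
-- duplicates in a single adjacency-comparison pass, instead of A's per-document
-- set-difference accumulation followed by a final sort.
-- (Python's list(set(words) - set(bag)) has hash order; the final sort makes the
-- returned value independent of it, so the port uses PySem.Set.diff order.)

-- ===== PORT A =====
def createBigBagOfWords (corpus : List String) : List String :=
  let bag := corpus.foldl (fun bag doc =>
    let words := PySem.Str.split₀ doc
    let notInBag := PySem.Set.diff (PySem.Set.ofList words) (PySem.Set.ofList bag)
    bag ++ notInBag) []
  PySem.List.sorted bag (fun x => x) false

-- ===== PORT B =====
def createBigBagOfWords_alt (corpus : List String) : List String :=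
  let allWords := corpus.foldl (fun acc doc =>
    (PySem.Str.split₀ doc).foldl (fun a w => a ++ [w]) acc) []
  let sortedWords := PySem.List.sorted allWords (fun x => x) false
  sortedWords.foldl (fun res w =>
    if res = [] ∨ res.getLast? ≠ some w then res ++ [w] else res) []

-- ===== PRECONDITION & SPEC =====
def Spec_createBigBagOfWords (corpus : List String) (out : List String) : Prop := out = createBigBagOfWords_alt corpus
instance (corpus : List String) (out : List String) : Decidable (Spec_createBigBagOfWords corpus out) := by unfold Spec_createBigBagOfWords; infer_instance

-- ===== CLAIM (what is proved, stated in full; the proofs are below) =====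
def Claim_equal_createBigBagOfWords : Prop := ∀ (corpus : List String), Dom_createBigBagOfWords corpus → Spec_createBigBagOfWords corpus (createBigBagOfWords corpus)

-- ===== LEMMAS AND PROOFS =====

-- A's accumulated bag: nodup, with the members of all tokens seen so far.
theorem bagA_invariant (corpus : List String) (bag : List String) (hn : bag.Nodup) :
    (corpus.foldl (fun bag doc =>
      bag ++ PySem.Set.diff (PySem.Set.ofList (PySem.Str.split₀ doc)) (PySem.Set.ofList bag)) bag).Nodup ∧
    (∀ x, x ∈ corpus.foldl (fun bag doc =>
      bag ++ PySem.Set.diff (PySem.Set.ofList (PySem.Str.split₀ doc)) (PySem.Set.ofList bag)) bag ↔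
      x ∈ bag ∨ ∃ doc ∈ corpus, x ∈ PySem.Str.split₀ doc) := by
  induction corpus generalizing bag with
  | nil => simp [hn]
  | cons d ds ih =>
    have hnodup : (bag ++ PySem.Set.diff (PySem.Set.ofList (PySem.Str.split₀ d)) (PySem.Set.ofList bag)).Nodup := by
      refine List.Nodup.append hn (PySem.Set.nodup_diff _ _ (PySem.Set.nodup_ofList _)) ?_
      intro x hx hx'
      have := (PySem.Set.mem_diff _ _ _ |>.mp hx').2
      exact this ((PySem.Set.mem_ofList _ _ |>.mpr hx))
    obtain ⟨h1, h2⟩ := ih _ hnodup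
    refine ⟨h1, ?_⟩
    intro x
    rw [List.foldl_cons, h2]
    simp only [List.mem_append, PySem.Set.mem_diff _ _ _, PySem.Set.mem_ofList _ _, List.mem_cons]
    constructor
    · rintro (((h | ⟨h, -⟩) | ⟨doc, hd, hx⟩))
      · exact Or.inl h
      · exact Or.inr ⟨d, Or.inl rfl, h⟩
      · exact Or.inr ⟨doc, Or.inr hd, hx⟩
    · rintro (h | ⟨doc, (rfl | hd), hx⟩)
      · exact Or.inl (Or.inl h)
      · by_cases hb : x ∈ bag
        · exact Or.inl (Or.inl hb)
        · exact Or.inl (Or.inr ⟨hx, hb⟩)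
      · exact Or.inr ⟨doc, hd, hx⟩

-- B's inner flattening loop appends the tokens.
theorem foldl_append_singleton (l acc : List String) :
    l.foldl (fun a w => a ++ [w]) acc = acc ++ l := by
  induction l generalizing acc with
  | nil => simp
  | cons x xs ih => simp [List.foldl, ih]

theorem allWords_eq (corpus : List String) :
    corpus.foldl (fun acc doc => (PySem.Str.split₀ doc).foldl (fun a w => a ++ [w]) acc) [] =
    corpus.flatMap (fun doc => PySem.Str.split₀ doc) := by
  have h : (fun (acc : List String) (doc : String) => (PySem.Str.split₀ doc).foldl (fun a w => a ++ [w]) acc) =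
      fun (acc : List String) (doc : String) => acc ++ PySem.Str.split₀ doc := by
    funext a d; exact foldl_append_singleton _ _
  rw [h, PySem.List.foldl_append_eq_flatMap]
  simp

-- In a strictly increasing list every element is ≤ the last one.
theorem le_getLast_of_pairwise_lt (l : List String) (lst : String)
    (hp : l.Pairwise (· < ·)) (hl : l.getLast? = some lst) :
    ∀ a ∈ l, a ≤ lst := by
  obtain ⟨ys, rfl⟩ := List.getLast?_eq_some_iff.mp hl
  rw [List.pairwise_append] at hp
  intro a ha
  rcases List.mem_append.mp ha with h | h
  · exact le_of_lt (hp.2.2 a h lst (List.mem_singleton_self _))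
  · rw [List.mem_singleton.mp h]

-- The adjacency-dedup pass over a ≤-sorted list yields a strictly increasing
-- list with the same members.
theorem dedup_pass_invariant (l acc : List String)
    (hl : l.Pairwise (· ≤ ·)) (hacc : acc.Pairwise (· < ·))
    (hle : ∀ a ∈ acc, ∀ x ∈ l, a ≤ x) :
    (l.foldl (fun res w => if res = [] ∨ res.getLast? ≠ some w then res ++ [w] else res) acc).Pairwise (· < ·) ∧
    (∀ x, x ∈ l.foldl (fun res w => if res = [] ∨ res.getLast? ≠ some w then res ++ [w] else res) acc ↔
      x ∈ acc ∨ x ∈ l) := by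
  induction l generalizing acc with
  | nil => exact ⟨hacc, by simp⟩
  | cons w ws ih =>
    rw [List.pairwise_cons] at hl
    simp only [List.foldl_cons]
    by_cases hc : acc = [] ∨ acc.getLast? ≠ some w
    · rw [if_pos hc]
      have hlt : ∀ a ∈ acc, a < w := by
        intro a ha
        rcases hc with hc | hc
        · simp [hc] at ha
        · have hle' : a ≤ w := hle a ha w (List.mem_cons_self)
          rcases lt_or_eq_of_le hle' with h | h
          · exact h
          · exfalso
            subst h
            -- a = w ∈ acc, so w ≤ last of acc ≤ w, hence last = w, contradiction
            cases hlast : acc.getLast? with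
            | none => simp_all
            | some lst =>
              have h1 : a ≤ lst := le_getLast_of_pairwise_lt acc lst hacc hlast a ha
              have h2 : lst ∈ acc := by
                obtain ⟨ys, rfl⟩ := List.getLast?_eq_some_iff.mp hlast
                simp
              have h3 : lst ≤ a := hle lst h2 a (List.mem_cons_self)
              exact hc (by rw [hlast, le_antisymm h1 h3])
      have hacc' : (acc ++ [w]).Pairwise (· < ·) := by
        rw [List.pairwise_append]
        exact ⟨hacc, List.pairwise_singleton _ _, by simpa using hlt⟩
      have hle' : ∀ a ∈ acc ++ [w], ∀ x ∈ ws, a ≤ x := by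
        intro a ha x hx
        rcases List.mem_append.mp ha with h | h
        · exact hle a h x (List.mem_cons_of_mem _ hx)
        · rw [List.mem_singleton.mp h]; exact hl.1 x hx
      obtain ⟨r1, r2⟩ := ih (acc ++ [w]) hl.2 hacc' hle'
      refine ⟨r1, fun x => ?_⟩
      rw [r2 x]
      simp only [List.mem_append, List.mem_cons]
      tauto
    · rw [if_neg hc]
      push Not at hc
      have hwmem : w ∈ acc := by
        obtain ⟨ys, hys⟩ := List.getLast?_eq_some_iff.mp hc.2
        rw [hys]; simp
      have hle' : ∀ a ∈ acc, ∀ x ∈ ws, a ≤ x := by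
        intro a ha x hx
        exact hle a ha x (List.mem_cons_of_mem _ hx)
      obtain ⟨r1, r2⟩ := ih acc hl.2 hacc hle'
      refine ⟨r1, fun x => ?_⟩
      rw [r2 x]
      simp only [List.mem_cons]
      constructor
      · tauto
      · rintro (h | rfl | h)
        · exact Or.inl h
        · exact Or.inl hwmem
        · exact Or.inr h

-- ===== VERDICT (by name: the statement is the Claim_ definition above) =====
theorem createBigBagOfWords_spec : Claim_equal_createBigBagOfWords := by
  intro corpus _
  show createBigBagOfWords corpus = createBigBagOfWords_alt corpus
  unfold createBigBagOfWords createBigBagOfWords_alt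
  rw [allWords_eq]
  set allW := corpus.flatMap (fun doc => PySem.Str.split₀ doc) with hallW
  set res := (PySem.List.sorted allW (fun x => x) false).foldl
      (fun res w => if res = [] ∨ res.getLast? ≠ some w then res ++ [w] else res) [] with hres
  obtain ⟨hbn, hbm⟩ := bagA_invariant corpus [] List.nodup_nil
  obtain ⟨hrp, hrm⟩ := dedup_pass_invariant (PySem.List.sorted allW (fun x => x) false) []
    (by simpa using PySem.List.sorted_pairwise allW (fun x => x))
    List.Pairwise.nil (by simp)
  have hrn : res.Nodup := hrp.imp ne_of_lt
  apply PySem.List.sorted_eq_of_perm_of_pairwise_lt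
  · rw [List.perm_ext_iff_of_nodup hrn hbn]
    intro a
    rw [hbm a, hrm a]
    simp [PySem.List.mem_sorted, hallW, List.mem_flatMap]
  · exact hrp
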